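-- pv_equiv track=rewrite | github.com/ertamaki/sql-normalizer | src/exasol_sql_normalizer/handlers/import_into.py | _end_of_quoted_string
-- ===== SOURCE A (Python) =====
-- def _end_of_quoted_string(sql: str, pos: int) -> int:
--     """Return position after the closing quote of a single-quoted string at pos."""
--     i = pos + 1
--     while i < len(sql):
--         if sql[i] == "'":
--             if i + 1 < len(sql) and sql[i + 1] == "'":
--                 i += 2
--             else:
--                 return i + 1
--         else:
--             i += 1
--     return len(sql)
-- ===== SOURCE B (Python) =====
-- def _end_of_quoted_string(sql: str, pos: int) -> int:
--     """Return position after the closing quote of a single-quoted string at pos."""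
--     n = len(sql)
--     parts = sql[pos + 1:].split("'")
--     i = pos + 1
--     while len(parts) > 1:
--         first = parts.pop(0)
--         i += len(first) + 1
--         if parts[0] == "" and len(parts) > 1:
--             parts.pop(0)
--             i += 1
--         else:
--             return i
--     return n
-- ===== Notes on version B (the rewrite author's own statement) =====
-- stated objective: alternative
-- what changed: Instead of stepping index-by-index with a per-character escape branch, B splits the tail sql[pos+1:] on the quote character once and walks the resulting list of segments, consuming one segment per real quote and a segment pair per escaped '' pair; the character scan moves into C-level str.split.
-- outside the precondition, e.g. on _end_of_quoted_string("'a", -2): A returns 1, B returns 2; on _end_of_quoted_string('a', -3): A raises IndexError, B returns 1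
import Mathlib
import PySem

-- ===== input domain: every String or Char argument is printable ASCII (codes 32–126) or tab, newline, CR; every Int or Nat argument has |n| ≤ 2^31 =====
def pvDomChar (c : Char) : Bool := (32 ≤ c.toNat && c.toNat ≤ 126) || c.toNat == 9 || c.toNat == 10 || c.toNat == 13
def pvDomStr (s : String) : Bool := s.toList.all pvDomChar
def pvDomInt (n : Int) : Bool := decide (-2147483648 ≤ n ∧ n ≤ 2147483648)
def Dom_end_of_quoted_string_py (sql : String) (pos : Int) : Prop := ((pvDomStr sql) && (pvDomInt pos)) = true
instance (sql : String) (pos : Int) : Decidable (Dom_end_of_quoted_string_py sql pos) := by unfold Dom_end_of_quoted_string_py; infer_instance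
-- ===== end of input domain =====

-- B replaces A's per-character scan by one split of sql[pos+1:] on the quote character followed by a
-- walk over the segment list (an alternative decomposition; return values agree on Pre_).

-- ===== PORT A =====
-- A's while-loop: i steps by 1 over non-quotes, by 2 over doubled quotes; sql[i] is PySem.List.pyGet?
-- (Python negative-index wraparound kept); the `none` case of pyGet? is Python's IndexError, excluded by
-- Pre_end_of_quoted_string_py. The fuel argument only makes the loop total: the top-level call passes
-- enough for every run (i grows by at least 1 per pass), so the 0 case is never reached there.
def pvEoqLoopA (l : List Char) (i : Int) : Nat → Int
  | 0 => 0
  | fuel + 1 =>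
    if i < (l.length : Int) then
      match PySem.List.pyGet? l i with
      | none => 0  -- Python raises IndexError here; excluded by Pre_end_of_quoted_string_py
      | some c =>
        if c = '\'' then
          if i + 1 < (l.length : Int) ∧ PySem.List.pyGet? l (i + 1) = some '\'' then
            pvEoqLoopA l (i + 2) fuel
          else i + 1
        else pvEoqLoopA l (i + 1) fuel
    else (l.length : Int)

def end_of_quoted_string_py (sql : String) (pos : Int) : Int :=
  pvEoqLoopA sql.toList (pos + 1) (((sql.toList.length : Int) - (pos + 1)).toNat + 1)

-- ===== PORT B =====
-- Source B's while-loop over `parts` (the list sql[pos+1:].split("'")), popping from the front: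
-- while len(parts) > 1: pop the first segment, advance i past it and its quote; a following empty
-- segment that is not the last one is a doubled quote '' (pop it too, i += 1); otherwise return i.
def pvEoqWalkB (n : Int) : Int → List (List Char) → Int
  | _, [] => n                    -- len(parts) ≤ 1: fall through to `return n`
  | _, [_] => n
  | i, first :: rest =>
    let i' := i + (first.length : Int) + 1
    match rest with
    | [] :: p :: rest' => pvEoqWalkB n (i' + 1) (p :: rest')   -- parts[0] == "" and len(parts) > 1
    | _ => i'

def end_of_quoted_string_py_alt (sql : String) (pos : Int) : Int :=
  pvEoqWalkB (sql.toList.length : Int) (pos + 1)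
    (PySem.Chars.splitOn (PySem.List.slice sql.toList (some (pos + 1)) none) ['\''])

-- ===== PRECONDITION & SPEC =====
-- Pre_ excludes pos < -1, outside the function's natural domain (pos indexes the opening quote, so the scan
-- starts at pos+1 ≥ 0): there A raises IndexError when pos+1 < -len(sql), and otherwise returns a value
-- produced by Python negative-index wraparound (its scan crosses index 0 and rescans the whole string),
-- an accident of A's indexing that no caller relies on.
def Pre_end_of_quoted_string_py (_sql : String) (pos : Int) : Prop :=
  0 ≤ pos + 1
instance (sql : String) (pos : Int) : Decidable (Pre_end_of_quoted_string_py sql pos) := by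
  unfold Pre_end_of_quoted_string_py; infer_instance

def pvWitness_end_of_quoted_string_py : String × Int := ("'abc' x", 0)

def Spec_end_of_quoted_string_py (sql : String) (pos : Int) (out : Int) : Prop :=
  out = end_of_quoted_string_py_alt sql pos
instance (sql : String) (pos : Int) (out : Int) : Decidable (Spec_end_of_quoted_string_py sql pos out) := by
  unfold Spec_end_of_quoted_string_py; infer_instance

-- ===== CLAIM (what is proved, stated in full; the proofs are below) =====
def Claim_equal_end_of_quoted_string_py : Prop := ∀ (sql : String) (pos : Int), Dom_end_of_quoted_string_py sql pos → Pre_end_of_quoted_string_py sql pos → Spec_end_of_quoted_string_py sql pos (end_of_quoted_string_py sql pos)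

-- ===== LEMMAS AND PROOFS =====

-- reference function: chars consumed from the start of the suffix until after the closing quote,
-- none if the string is unterminated
def pvEoqRef : List Char → Option Nat
  | [] => none
  | c :: t =>
    if c = '\'' then
      match t with
      | c2 :: t2 => if c2 = '\'' then (pvEoqRef t2).map (· + 2) else some 1
      | [] => some 1
    else (pvEoqRef t).map (· + 1)

-- structural model of .split("'") on a char list
def pvSp : List Char → List (List Char)
  | [] => [[]]
  | c :: t =>
    if c = '\'' then [] :: pvSp t
    else
      match pvSp t with
      | [] => [[c]]
      | p :: ps => (c :: p) :: ps

theorem pvSp_ne_nil (t : List Char) : pvSp t ≠ [] := by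
  cases t with
  | nil => simp [pvSp]
  | cons c t =>
    simp only [pvSp]
    split_ifs
    · simp
    · cases h : pvSp t <;> simp

-- the fuel-based splitOn.go equals the structural model
theorem pv_go_eq_sp (fuel : Nat) : ∀ (l cur : List Char) (acc : List (List Char)),
    l.length < fuel →
    PySem.Chars.splitOn.go ['\''] fuel l cur acc
      = acc.reverse ++ (cur.reverse ++ (pvSp l).headI) :: (pvSp l).tail := by
  induction fuel with
  | zero => intro l cur acc h; omega
  | succ fuel ih =>
    intro l cur acc h
    cases l with
    | nil =>
      rw [PySem.Chars.splitOn.go.eq_def]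
      simp [pvSp]
    | cons c t =>
      rw [PySem.Chars.splitOn.go.eq_def]
      simp only []
      by_cases hc : c = '\''
      · have hpre : List.isPrefixOf ['\''] (c :: t) = true := by
          simp [List.isPrefixOf, hc]
        rw [if_pos hpre]
        have := ih t [] (cur.reverse :: acc) (by simp at h ⊢; omega)
        simp only [List.length_cons, List.length_nil, List.drop_succ_cons, List.drop_zero] at this ⊢
        rw [this]
        obtain ⟨p, ps, hps⟩ : ∃ p ps, pvSp t = p :: ps := by
          cases hx : pvSp t with
          | nil => exact absurd hx (pvSp_ne_nil t)
          | cons p ps => exact ⟨p, ps, rfl⟩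
        simp [pvSp, hc, hps]
      · have hpre : List.isPrefixOf ['\''] (c :: t) = false := by
          simp [List.isPrefixOf]
          exact fun h => absurd h.symm hc
        rw [if_neg (by simp [hpre])]
        have := ih t (c :: cur) acc (by simp at h ⊢; omega)
        rw [this]
        obtain ⟨p, ps, hps⟩ : ∃ p ps, pvSp t = p :: ps := by
          cases hx : pvSp t with
          | nil => exact absurd hx (pvSp_ne_nil t)
          | cons p ps => exact ⟨p, ps, rfl⟩
        simp [pvSp, hc, hps]

theorem pv_splitOn_eq_sp (l : List Char) :
    PySem.Chars.splitOn l ['\''] = pvSp l := by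
  unfold PySem.Chars.splitOn
  rw [pv_go_eq_sp (l.length + 1) l [] [] (by omega)]
  obtain ⟨p, ps, hps⟩ : ∃ p ps, pvSp l = p :: ps := by
    cases hx : pvSp l with
    | nil => exact absurd hx (pvSp_ne_nil l)
    | cons p ps => exact ⟨p, ps, rfl⟩
  simp [hps]

theorem pvEoqRef_cons_ne (c : Char) (t : List Char) (hc : ¬ c = '\'') :
    pvEoqRef (c :: t) = (pvEoqRef t).map (· + 1) := by
  cases t <;> simp [pvEoqRef, hc]

-- the walk over the split segments computes the reference function
theorem pv_walk_eq_ref (t : List Char) : ∀ (n i : Int),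
    pvEoqWalkB n i (pvSp t)
      = match pvEoqRef t with
        | some d => i + (d : Int)
        | none => n := by
  induction t using pvEoqRef.induct with
  | case1 =>
    intro n i
    simp [pvSp, pvEoqRef, pvEoqWalkB]
  | case2 t2 ih =>
    intro n i
    obtain ⟨p, ps, hps⟩ : ∃ p ps, pvSp t2 = p :: ps := by
      cases hx : pvSp t2 with
      | nil => exact absurd hx (pvSp_ne_nil t2)
      | cons p ps => exact ⟨p, ps, rfl⟩
    simp only [pvSp, pvEoqRef, hps, if_true]
    have h1 : pvEoqWalkB n i ([] :: [] :: p :: ps) = pvEoqWalkB n (i + 1 + 1) (p :: ps) := by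
      simp [pvEoqWalkB]
    rw [h1, ← hps, ih n (i + 1 + 1)]
    cases hr : pvEoqRef t2 with
    | none => simp
    | some d =>
      simp only [Option.map_some]
      push_cast
      ring_nf
  | case3 c2 t2 hc2 =>
    intro n i
    obtain ⟨p, ps, hps⟩ : ∃ p ps, pvSp t2 = p :: ps := by
      cases hx : pvSp t2 with
      | nil => exact absurd hx (pvSp_ne_nil t2)
      | cons p ps => exact ⟨p, ps, rfl⟩
    simp [pvSp, pvEoqRef, hps, hc2, pvEoqWalkB]
  | case4 =>
    intro n i
    simp [pvSp, pvEoqRef, pvEoqWalkB]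
  | case5 c t hc ih =>
    intro n i
    obtain ⟨p, ps, hps⟩ : ∃ p ps, pvSp t = p :: ps := by
      cases hx : pvSp t with
      | nil => exact absurd hx (pvSp_ne_nil t)
      | cons p ps => exact ⟨p, ps, rfl⟩
    have hshift : pvEoqWalkB n i (pvSp (c :: t)) = pvEoqWalkB n (i + 1) (pvSp t) := by
      simp only [pvSp, if_neg hc, hps]
      cases ps with
      | nil => simp [pvEoqWalkB]
      | cons q qs =>
        cases hq : q with
        | nil =>
          cases qs with
          | nil =>
            simp only [pvEoqWalkB, List.length_cons]
            push_cast; ring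
          | cons r rs =>
            simp only [pvEoqWalkB, List.length_cons]
            congr 1
            push_cast; ring
        | cons a as =>
          simp only [pvEoqWalkB, List.length_cons]
          push_cast; ring
    rw [hshift, ih n (i + 1), pvEoqRef_cons_ne c t hc]
    cases hr : pvEoqRef t with
    | none => rfl
    | some d =>
      simp only [Option.map_some]
      push_cast
      ring_nf

-- A's loop computes the reference function on the suffix (given enough fuel)
theorem pv_loopA_eq_ref (l : List Char) (fuel : Nat) :
    ∀ (k : Nat), l.length - k < fuel →
    pvEoqLoopA l (k : Int) fuel
      = match pvEoqRef (l.drop k) with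
        | some d => (k : Int) + (d : Int)
        | none => (l.length : Int) := by
  induction fuel with
  | zero => intro k h; omega
  | succ fuel ih =>
    intro k h
    by_cases hlt : k < l.length
    · have hdrop : List.drop k l = l[k] :: List.drop (k + 1) l := List.drop_eq_getElem_cons hlt
      have hget : PySem.List.pyGet? l (k : Int) = some l[k] := by
        rw [PySem.List.pyGet?_natCast, List.getElem?_eq_getElem hlt]
      rw [pvEoqLoopA, if_pos (by exact_mod_cast hlt), hget]
      by_cases hq : l[k] = '\''
      · simp only [if_pos hq]
        by_cases hk1 : k + 1 < l.length
        · have hdrop1 : List.drop (k + 1) l = l[k + 1] :: List.drop (k + 2) l :=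
            List.drop_eq_getElem_cons hk1
          have hget1 : PySem.List.pyGet? l ((k : Int) + 1) = some l[k + 1] := by
            have : (k : Int) + 1 = ((k + 1 : Nat) : Int) := by push_cast; ring
            rw [this, PySem.List.pyGet?_natCast, List.getElem?_eq_getElem hk1]
          by_cases hq1 : l[k + 1] = '\''
          · rw [if_pos ⟨by exact_mod_cast hk1, by rw [hget1, hq1]⟩]
            have hcast : (k : Int) + 2 = ((k + 2 : Nat) : Int) := by push_cast; ring
            rw [hcast, ih (k + 2) (by omega)]
            rw [hdrop, hdrop1]
            simp only [pvEoqRef, if_pos hq, if_pos hq1]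
            cases hr : pvEoqRef (List.drop (k + 2) l) with
            | none => simp
            | some d =>
              simp only [Option.map_some]
              push_cast; ring_nf
          · rw [if_neg (by
              rintro ⟨-, hg⟩
              rw [hget1] at hg
              exact hq1 (Option.some.injEq .. ▸ hg))]
            rw [hdrop, hdrop1]
            simp only [pvEoqRef, if_pos hq, if_neg hq1]
            norm_num
        · rw [if_neg (by rintro ⟨hlt1, -⟩; exact hk1 (by exact_mod_cast hlt1))]
          have hnil : List.drop (k + 1) l = [] := List.drop_eq_nil_of_le (by omega)
          rw [hdrop, hnil]
          simp [pvEoqRef, hq]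
      · simp only [if_neg hq]
        have hcast : (k : Int) + 1 = ((k + 1 : Nat) : Int) := by push_cast; ring
        rw [hcast, ih (k + 1) (by omega)]
        rw [hdrop, pvEoqRef_cons_ne _ _ hq]
        cases hr : pvEoqRef (List.drop (k + 1) l) with
        | none => rfl
        | some d =>
          simp only [Option.map_some]
          push_cast; ring_nf
    · have hnil : List.drop k l = [] := List.drop_eq_nil_of_le (by omega)
      rw [pvEoqLoopA, if_neg (by exact_mod_cast hlt), hnil]
      simp [pvEoqRef]

-- ===== VERDICT (by name: the statement is the Claim_ definition above) =====
theorem end_of_quoted_string_py_spec : Claim_equal_end_of_quoted_string_py := by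
  intro sql pos _hDom hPre
  unfold Pre_end_of_quoted_string_py at hPre
  unfold Spec_end_of_quoted_string_py end_of_quoted_string_py end_of_quoted_string_py_alt
  obtain ⟨k, hk⟩ : ∃ k : Nat, pos + 1 = (k : Int) := ⟨(pos + 1).toNat, by omega⟩
  have hslice : PySem.List.slice sql.toList (some ((k : Nat) : Int)) none
      = List.drop k sql.toList := by
    rw [PySem.List.slice_from sql.toList (by omega)]
    simp
  rw [hk, hslice, pv_splitOn_eq_sp,
      pv_loopA_eq_ref sql.toList _ k (by omega),
      pv_walk_eq_ref (List.drop k sql.toList) (sql.toList.length : Int) ((k : Nat) : Int)]
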